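-- pv_equiv track=rewrite | github.com/MariaCebriaF/AdventOfCode2025 | dia10/solve.py | latex_model
-- ===== SOURCE A (Python) =====
-- def latex_model(machine_id, n, buttons, target):
--     m = len(buttons)
--
--     # Construimos S_i = {j | i in buttons[j]}
--     S = []
--     for i in range(n):
--         S_i = [j for j in range(m) if i in buttons[j]]
--         S.append(S_i)
--
--     lines = []
--     lines.append(f"% Máquina {machine_id}")
--     lines.append(r"\[")
--     lines.append(r"\begin{aligned}")
--     lines.append(r"\min \quad & \sum_{j=0}^{m-1} x_j \\")
--     lines.append(
--         r"\text{s.a.}\quad & \sum_{j \in S_i} x_j = b_i \quad \forall i=0,\dots,n-1 \\")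
--     lines.append(r"& x_j \in \mathbb{Z}_{\ge 0} \quad \forall j=0,\dots,m-1")
--     lines.append(r"\end{aligned}")
--     lines.append(r"\]")
--
--     # Sustitución explícita de restricciones
--     lines.append(r"\[")
--     lines.append(r"\begin{aligned}")
--     for i in range(n):
--         if S[i]:
--             lhs = " + ".join([f"x_{j}" for j in S[i]])
--         else:
--             lhs = "0"
--         lines.append(f"{lhs} &= {target[i]} \\\\")
--     lines.append(r"\end{aligned}")
--     lines.append(r"\]")
--
--     return "\n".join(lines)
-- ===== SOURCE B (Python) =====
-- # B inverts the incidence once (one pass over buttons building i -> [j,...]),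
-- # instead of scanning every button list for every i in range(n).
--
-- _HEADER_TAIL = (
--     r"\[",
--     r"\begin{aligned}",
--     r"\min \quad & \sum_{j=0}^{m-1} x_j \\",
--     r"\text{s.a.}\quad & \sum_{j \in S_i} x_j = b_i \quad \forall i=0,\dots,n-1 \\",
--     r"& x_j \in \mathbb{Z}_{\ge 0} \quad \forall j=0,\dots,m-1",
--     r"\end{aligned}",
--     r"\]",
--     r"\[",
--     r"\begin{aligned}",
-- )
--
--
-- def _row(js, b):
--     lhs = " + ".join("x_{}".format(j) for j in js) if js else "0"
--     return "{} &= {} \\\\".format(lhs, b)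
--
--
-- def latex_model(machine_id, n, buttons, target):
--     # Inverted index: for coefficient i, the buttons j containing it (ascending j).
--     index = {}
--     for j, btn in enumerate(buttons):
--         for i in dict.fromkeys(btn):  # each distinct coefficient once
--             index.setdefault(i, []).append(j)
--
--     rows = [_row(index.get(i, []), target[i]) for i in range(n)]
--
--     return "\n".join(
--         ["% Máquina {}".format(machine_id), *_HEADER_TAIL, *rows,
--          r"\end{aligned}", r"\]"]
--     )
-- ===== Notes on version B (the rewrite author's own statement) =====
-- stated objective: faster
-- what changed: Instead of testing, for every i in range(n), membership of i in every button list (A's nested scans), B builds the inverted index i -> [j | i in buttons[j]] in one pass over buttons and then emits each constraint row by a dictionary lookup.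
import Mathlib
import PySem

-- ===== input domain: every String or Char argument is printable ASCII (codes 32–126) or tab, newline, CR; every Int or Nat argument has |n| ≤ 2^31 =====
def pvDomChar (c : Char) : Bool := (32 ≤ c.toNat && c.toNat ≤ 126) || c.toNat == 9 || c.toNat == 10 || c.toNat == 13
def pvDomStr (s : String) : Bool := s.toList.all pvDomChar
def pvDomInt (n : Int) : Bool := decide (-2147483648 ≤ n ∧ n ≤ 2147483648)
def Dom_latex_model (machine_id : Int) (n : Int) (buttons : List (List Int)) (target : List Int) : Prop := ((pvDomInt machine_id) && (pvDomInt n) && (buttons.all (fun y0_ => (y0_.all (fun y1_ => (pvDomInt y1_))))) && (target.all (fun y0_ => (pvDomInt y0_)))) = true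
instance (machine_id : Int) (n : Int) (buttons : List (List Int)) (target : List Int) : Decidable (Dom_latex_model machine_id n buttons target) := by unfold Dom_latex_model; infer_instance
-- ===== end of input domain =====

-- B inverts the incidence relation once (one pass over buttons) instead of A's
-- membership scan of every button list for every i in range(n): asymptotically faster.

-- ===== PORT A =====
-- Literal transliteration of A: buttons[j] / target[i] are in range wherever A returns
-- (j < m by the range; i < len(target) by Pre_), so pyGetD is exact there.
def latex_model (machine_id : Int) (n : Int) (buttons : List (List Int)) (target : List Int) : String :=
  let m : Int := buttons.length
  -- S_i = [j for j in range(m) if i in buttons[j]]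
  let S : List (List Int) := (PySem.List.pyRange 0 n 1).foldl
    (fun S i => S ++ [(PySem.List.pyRange 0 m 1).filter
        (fun j => decide (i ∈ PySem.List.pyGetD buttons j []))]) []
  let lines : List String :=
    ["% Máquina " ++ PySem.Int.toStr machine_id,
     "\\[",
     "\\begin{aligned}",
     "\\min \\quad & \\sum_{j=0}^{m-1} x_j \\\\",
     "\\text{s.a.}\\quad & \\sum_{j \\in S_i} x_j = b_i \\quad \\forall i=0,\\dots,n-1 \\\\",
     "& x_j \\in \\mathbb{Z}_{\\ge 0} \\quad \\forall j=0,\\dots,m-1",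
     "\\end{aligned}",
     "\\]",
     "\\[",
     "\\begin{aligned}"]
  let lines := (PySem.List.pyRange 0 n 1).foldl
    (fun lines i =>
      let Si := PySem.List.pyGetD S i []
      let lhs := if Si = [] then "0"
        else PySem.Str.join " + " (Si.map (fun j => "x_" ++ PySem.Int.toStr j))
      lines ++ [lhs ++ " &= " ++ PySem.Int.toStr (PySem.List.pyGetD target i 0) ++ " \\\\"]) lines
  let lines := lines ++ ["\\end{aligned}"] ++ ["\\]"]
  PySem.Str.join "\n" lines

-- ===== PORT B =====
def latexHeaderTail : List String :=
  ["\\[",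
   "\\begin{aligned}",
   "\\min \\quad & \\sum_{j=0}^{m-1} x_j \\\\",
   "\\text{s.a.}\\quad & \\sum_{j \\in S_i} x_j = b_i \\quad \\forall i=0,\\dots,n-1 \\\\",
   "& x_j \\in \\mathbb{Z}_{\\ge 0} \\quad \\forall j=0,\\dots,m-1",
   "\\end{aligned}",
   "\\]",
   "\\[",
   "\\begin{aligned}"]

def latexRow (js : List Int) (b : Int) : String :=
  let lhs := if js = [] then "0"
    else PySem.Str.join " + " (js.map (fun j => "x_" ++ PySem.Int.toStr j))
  lhs ++ " &= " ++ PySem.Int.toStr b ++ " \\\\"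

def latex_model_alt (machine_id : Int) (n : Int) (buttons : List (List Int)) (target : List Int) : String :=
  -- index.setdefault(i, []).append(j) over the distinct coefficients of each button
  let index : PySem.Dict Int (List Int) := (PySem.List.enumerate buttons 0).foldl
    (fun d p => (PySem.List.dedup p.2).foldl (fun d i => d.modify i [] (· ++ [p.1])) d)
    PySem.Dict.empty
  let rows : List String := (PySem.List.pyRange 0 n 1).map
    (fun i => latexRow (index.getD i []) (PySem.List.pyGetD target i 0))
  PySem.Str.join "\n"
    ((("% Máquina " ++ PySem.Int.toStr machine_id) :: latexHeaderTail) ++ rows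
      ++ ["\\end{aligned}", "\\]"])

-- ===== PRECONDITION & SPEC =====
-- A raises IndexError at target[i] iff n > len(target); it returns everywhere else.
def Pre_latex_model (machine_id : Int) (n : Int) (buttons : List (List Int)) (target : List Int) : Prop :=
  n ≤ (target.length : Int)
instance (machine_id : Int) (n : Int) (buttons : List (List Int)) (target : List Int) : Decidable (Pre_latex_model machine_id n buttons target) := by unfold Pre_latex_model; infer_instance

def pvWitness_latex_model : Int × Int × List (List Int) × List Int := (1, 2, [[0], [0, 1]], [3, 4])

def Spec_latex_model (machine_id : Int) (n : Int) (buttons : List (List Int)) (target : List Int) (out : String) : Prop := out = latex_model_alt machine_id n buttons target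
instance (machine_id : Int) (n : Int) (buttons : List (List Int)) (target : List Int) (out : String) : Decidable (Spec_latex_model machine_id n buttons target out) := by unfold Spec_latex_model; infer_instance

-- ===== CLAIM (what is proved, stated in full; the proofs are below) =====
def Claim_equal_latex_model : Prop := ∀ (machine_id : Int) (n : Int) (buttons : List (List Int)) (target : List Int), Dom_latex_model machine_id n buttons target → Pre_latex_model machine_id n buttons target → Spec_latex_model machine_id n buttons target (latex_model machine_id n buttons target)

-- ===== LEMMAS AND PROOFS =====

-- a comprehension with an if-guard is the flatMap of singletons
theorem pv_filter_eq_flatMap {α : Type} (l : List α) (p : α → Bool) :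
    l.flatMap (fun x => if p x then [x] else []) = l.filter p := by
  induction l with
  | nil => rfl
  | cons a t ih => simp only [List.flatMap_cons, ih, List.filter_cons]; split <;> simp

-- filtering a Nodup list for one element
theorem pv_filter_nodup (l : List Int) (i : Int) (h : l.Nodup) :
    l.filter (fun x => x == i) = if i ∈ l then [i] else [] := by
  rw [List.filter_beq]
  by_cases hm : i ∈ l
  · simp [hm, List.count_eq_one_of_mem h hm]
  · simp [hm, List.count_eq_zero_of_not_mem hm]

-- the heart of the equivalence: A's per-i scan equals B's inverted-index entry
theorem pv_index_eq (buttons : List (List Int)) (i : Int) :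
    ((PySem.List.enumerate buttons 0).foldl
        (fun d p => (PySem.List.dedup p.2).foldl (fun d k => d.modify k [] (· ++ [p.1])) d)
        PySem.Dict.empty).getD i []
      = (PySem.List.pyRange 0 (buttons.length : Int) 1).filter
          (fun j => decide (i ∈ PySem.List.pyGetD buttons j [])) := by
  -- the nested loop is one flat fold over all (coefficient, button-index) pairs
  have hflat :
      (PySem.List.enumerate buttons 0).foldl
        (fun d p => (PySem.List.dedup p.2).foldl (fun d k => d.modify k [] (· ++ [p.1])) d)
        PySem.Dict.empty
      = ((PySem.List.enumerate buttons 0).flatMap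
          (fun p => (PySem.List.dedup p.2).map (fun k => (k, p.1)))).foldl
          (fun d q => d.modify q.1 [] (· ++ [q.2])) PySem.Dict.empty := by
    rw [List.foldl_flatMap]
    simp only [List.foldl_map]
  rw [hflat, PySem.Dict.getD_foldl_modify_append, PySem.Dict.getD_empty, List.nil_append,
    List.filter_flatMap, List.map_flatMap]
  have hinner : ∀ p : Int × List Int,
      (((PySem.List.dedup p.2).map (fun k => (k, p.1))).filter (fun q => q.1 == i)).map (·.2)
        = if i ∈ p.2 then [p.1] else [] := by
    intro p
    rw [List.filter_map]
    have : ((fun q : Int × Int => q.1 == i) ∘ fun k => (k, p.1)) = fun k => k == i := rfl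
    rw [this, pv_filter_nodup _ _ (PySem.List.nodup_dedup p.2)]
    by_cases hm : i ∈ p.2
    · simp [hm]
    · simp [hm]
  simp only [hinner]
  rw [PySem.List.enumerate_eq_map_pyRange buttons ([] : List Int), List.flatMap_map]
  rw [show (fun j => if i ∈ PySem.List.pyGetD buttons j [] then [j] else [])
        = (fun j => if decide (i ∈ PySem.List.pyGetD buttons j []) then [j] else []) by
      funext j; split_ifs with h1 h2 <;> simp_all]
  exact pv_filter_eq_flatMap _ _

theorem latex_model_spec_aux (machine_id : Int) (n : Int) (buttons : List (List Int)) (target : List Int) :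
    latex_model machine_id n buttons target = latex_model_alt machine_id n buttons target := by
  unfold latex_model latex_model_alt latexHeaderTail latexRow
  simp only [PySem.List.foldl_append_singleton_eq_map, List.nil_append]
  congr 1
  simp only [List.cons_append, List.nil_append, List.append_assoc]
  congr 10
  congr 1
  refine List.map_congr_left (fun i hi => ?_)
  rw [PySem.List.mem_pyRange_one] at hi
  rw [PySem.List.pyGetD_map_pyRange_of_nonneg _ _ _ _ hi.1 hi.2, pv_index_eq]

-- ===== VERDICT (by name: the statement is the Claim_ definition above) =====
theorem latex_model_spec : Claim_equal_latex_model := by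
  intro machine_id n buttons target _ _
  exact latex_model_spec_aux machine_id n buttons target
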